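-- pv_equiv track=rewrite | github.com/coombesmatthew/car-check-ai | backend/app/services/data/tax_calculator.py | get_co2_band
-- ===== SOURCE A (Python) =====
-- CO2_BANDS_POST_2017 = [
--     (0, "A"),
--     (50, "B"),
--     (75, "C"),
--     (90, "D"),
--     (100, "E"),
--     (110, "F"),
--     (130, "G"),
--     (150, "H"),
--     (170, "I"),
--     (190, "J"),
--     (225, "K"),
--     (255, "L"),
--     (float("inf"), "M"),
-- ]
--
-- CO2_BANDS_PRE_2017 = [
--     (100, "A"),     # 0-100 g/km
--     (110, "B"),     # 101-110 g/km
--     (120, "C"),     # 111-120 g/km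
--     (150, "D"),     # 121-150 g/km
--     (170, "E"),     # 151-170 g/km
--     (190, "F"),     # 171-190 g/km
--     (225, "G"),     # 191-225 g/km
--     (255, "H"),     # 226-255 g/km
--     (float("inf"), "I"),  # 256+ g/km
-- ]
--
-- def get_co2_band(co2: int, year: int | None = None) -> str:
--     """Get the VED band letter for a given CO2 emission value.
--
--     Bands differ based on registration year:
--     - Pre-April 2017: older band structure (A-I)
--     - Post-April 2017: new band structure (A-M)
--     """
--     # If year not provided, assume post-2017 (safer for newer vehicles)
--     if year is None or year >= 2017:
--         bands = CO2_BANDS_POST_2017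
--         default = "M"
--     else:
--         bands = CO2_BANDS_PRE_2017
--         default = "I"
--
--     for threshold, band in bands:
--         if co2 <= threshold:
--             return band
--     return default
-- ===== SOURCE B (Python) =====
-- import bisect
--
-- _THR_POST = [0, 50, 75, 90, 100, 110, 130, 150, 170, 190, 225, 255]
-- _LET_POST = ["A", "B", "C", "D", "E", "F", "G", "H", "I", "J", "K", "L", "M"]
-- _THR_PRE = [100, 110, 120, 150, 170, 190, 225, 255]
-- _LET_PRE = ["A", "B", "C", "D", "E", "F", "G", "H", "I"]
--
-- def get_co2_band(co2: int, year: int | None = None) -> str: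
--     if year is None or year >= 2017:
--         thresholds, letters = _THR_POST, _LET_POST
--     else:
--         thresholds, letters = _THR_PRE, _LET_PRE
--     return letters[bisect.bisect_left(thresholds, co2)]
-- ===== Notes on version B (the rewrite author's own statement) =====
-- stated objective: idiomatic
-- what changed: Replaces A's linear scan over (threshold, band) pairs (with a float('inf') sentinel and a default fallthrough) by bisect.bisect_left on a sorted threshold list indexing a parallel letter list.
import Mathlib
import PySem

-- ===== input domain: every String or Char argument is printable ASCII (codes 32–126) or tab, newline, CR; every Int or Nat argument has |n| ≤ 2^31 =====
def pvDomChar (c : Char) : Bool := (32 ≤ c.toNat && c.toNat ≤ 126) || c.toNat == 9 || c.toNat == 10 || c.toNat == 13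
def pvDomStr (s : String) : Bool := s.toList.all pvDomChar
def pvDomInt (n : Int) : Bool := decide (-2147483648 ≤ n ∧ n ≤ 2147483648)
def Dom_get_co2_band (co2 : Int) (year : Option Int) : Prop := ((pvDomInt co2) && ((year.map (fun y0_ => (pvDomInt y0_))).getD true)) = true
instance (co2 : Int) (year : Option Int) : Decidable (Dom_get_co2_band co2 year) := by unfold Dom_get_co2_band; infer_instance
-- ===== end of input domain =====

-- B replaces A's linear scan over (threshold, band) pairs with bisect_left over parallel threshold/letter lists (idiomatic).


-- ===== PORT A =====
-- threshold 'none' stands for float('inf'); 'co2 <= inf' is always True.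
def pvBandsPost : List (Option Int × String) :=
  [(some 0, "A"), (some 50, "B"), (some 75, "C"), (some 90, "D"), (some 100, "E"),
   (some 110, "F"), (some 130, "G"), (some 150, "H"), (some 170, "I"), (some 190, "J"),
   (some 225, "K"), (some 255, "L"), (none, "M")]

def pvBandsPre : List (Option Int × String) :=
  [(some 100, "A"), (some 110, "B"), (some 120, "C"), (some 150, "D"), (some 170, "E"),
   (some 190, "F"), (some 225, "G"), (some 255, "H"), (none, "I")]

def pvLoopA (co2 : Int) (dflt : String) : List (Option Int × String) → String
  | [] => dflt
  | (t, b) :: rest =>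
    match t with
    | none => b
    | some t => if co2 ≤ t then b else pvLoopA co2 dflt rest

def get_co2_band (co2 : Int) (year : Option Int) : String :=
  match year with
  | none => pvLoopA co2 "M" pvBandsPost
  | some y => if y ≥ 2017 then pvLoopA co2 "M" pvBandsPost else pvLoopA co2 "I" pvBandsPre

-- ===== PORT B =====
def pvThrPost : List Int := [0, 50, 75, 90, 100, 110, 130, 150, 170, 190, 225, 255]
def pvLetPost : List String := ["A", "B", "C", "D", "E", "F", "G", "H", "I", "J", "K", "L", "M"]
def pvThrPre : List Int := [100, 110, 120, 150, 170, 190, 225, 255]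
def pvLetPre : List String := ["A", "B", "C", "D", "E", "F", "G", "H", "I"]

-- bisect.bisect_left is PySem.List.bisectLeft; letters[idx] via getD (idx ≤ len thresholds < len letters, so always in range)
def get_co2_band_alt (co2 : Int) (year : Option Int) : String :=
  let p : List Int × List String :=
    match year with
    | none => (pvThrPost, pvLetPost)
    | some y => if y ≥ 2017 then (pvThrPost, pvLetPost) else (pvThrPre, pvLetPre)
  p.2.getD (PySem.List.bisectLeft p.1 co2) ""

-- ===== PRECONDITION & SPEC =====
def Spec_get_co2_band (co2 : Int) (year : Option Int) (out : String) : Prop := out = get_co2_band_alt co2 year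
instance (co2 : Int) (year : Option Int) (out : String) : Decidable (Spec_get_co2_band co2 year out) := by unfold Spec_get_co2_band; infer_instance

-- ===== CLAIM (what is proved, stated in full; the proofs are below) =====
def Claim_equal_get_co2_band : Prop := ∀ (co2 : Int) (year : Option Int), Dom_get_co2_band co2 year → Spec_get_co2_band co2 year (get_co2_band co2 year)

-- ===== LEMMAS AND PROOFS =====
lemma pv_bl_eq (xs : List Int) (x : Int) (hs : List.Pairwise (fun a b => a ≤ b) xs)
    (k : Nat) (hk : k ≤ xs.length)
    (hlo : ∀ _ : 0 < k, xs[k-1]'(by omega) < x)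
    (hhi : ∀ h : k < xs.length, x ≤ xs[k]'h) :
    PySem.List.bisectLeft xs x = k := by
  obtain ⟨hb1, hb2, hb3⟩ := PySem.List.bisectLeft_spec xs x hs
  rcases lt_trichotomy (PySem.List.bisectLeft xs x) k with h | h | h
  · have h0 : 0 < k := by omega
    have h1 := hb3 (k-1) (by omega) (by omega)
    have h2 := hlo h0
    omega
  · exact h
  · have hk2 : k < xs.length := by omega
    have h1 := hb2 k hk2 h
    have h2 := hhi hk2
    omega

lemma pv_sorted_post : List.Pairwise (fun a b => a ≤ b) pvThrPost := by decide
lemma pv_sorted_pre : List.Pairwise (fun a b => a ≤ b) pvThrPre := by decide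

set_option maxHeartbeats 1000000 in
lemma pv_post (co2 : Int) :
    pvLoopA co2 "M" pvBandsPost = pvLetPost.getD (PySem.List.bisectLeft pvThrPost co2) "" := by
  simp only [pvBandsPost, pvLoopA]
  split_ifs
  · rw [pv_bl_eq pvThrPost co2 pv_sorted_post 0 (by decide)
      (fun h => absurd h (by decide))
      (by intro h; simp only [pvThrPost]; simp; omega)]
    rfl
  · rw [pv_bl_eq pvThrPost co2 pv_sorted_post 1 (by decide)
      (by intro h; simp only [pvThrPost]; simp; omega)
      (by intro h; simp only [pvThrPost]; simp; omega)]
    rfl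
  · rw [pv_bl_eq pvThrPost co2 pv_sorted_post 2 (by decide)
      (by intro h; simp only [pvThrPost]; simp; omega)
      (by intro h; simp only [pvThrPost]; simp; omega)]
    rfl
  · rw [pv_bl_eq pvThrPost co2 pv_sorted_post 3 (by decide)
      (by intro h; simp only [pvThrPost]; simp; omega)
      (by intro h; simp only [pvThrPost]; simp; omega)]
    rfl
  · rw [pv_bl_eq pvThrPost co2 pv_sorted_post 4 (by decide)
      (by intro h; simp only [pvThrPost]; simp; omega)
      (by intro h; simp only [pvThrPost]; simp; omega)]
    rfl
  · rw [pv_bl_eq pvThrPost co2 pv_sorted_post 5 (by decide)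
      (by intro h; simp only [pvThrPost]; simp; omega)
      (by intro h; simp only [pvThrPost]; simp; omega)]
    rfl
  · rw [pv_bl_eq pvThrPost co2 pv_sorted_post 6 (by decide)
      (by intro h; simp only [pvThrPost]; simp; omega)
      (by intro h; simp only [pvThrPost]; simp; omega)]
    rfl
  · rw [pv_bl_eq pvThrPost co2 pv_sorted_post 7 (by decide)
      (by intro h; simp only [pvThrPost]; simp; omega)
      (by intro h; simp only [pvThrPost]; simp; omega)]
    rfl
  · rw [pv_bl_eq pvThrPost co2 pv_sorted_post 8 (by decide)
      (by intro h; simp only [pvThrPost]; simp; omega)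
      (by intro h; simp only [pvThrPost]; simp; omega)]
    rfl
  · rw [pv_bl_eq pvThrPost co2 pv_sorted_post 9 (by decide)
      (by intro h; simp only [pvThrPost]; simp; omega)
      (by intro h; simp only [pvThrPost]; simp; omega)]
    rfl
  · rw [pv_bl_eq pvThrPost co2 pv_sorted_post 10 (by decide)
      (by intro h; simp only [pvThrPost]; simp; omega)
      (by intro h; simp only [pvThrPost]; simp; omega)]
    rfl
  · rw [pv_bl_eq pvThrPost co2 pv_sorted_post 11 (by decide)
      (by intro h; simp only [pvThrPost]; simp; omega)
      (by intro h; simp only [pvThrPost]; simp; omega)]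
    rfl
  · rw [pv_bl_eq pvThrPost co2 pv_sorted_post 12 (by decide)
      (by intro h; simp only [pvThrPost]; simp; omega)
      (fun h => absurd h (by decide))]
    rfl

set_option maxHeartbeats 1000000 in
lemma pv_pre (co2 : Int) :
    pvLoopA co2 "I" pvBandsPre = pvLetPre.getD (PySem.List.bisectLeft pvThrPre co2) "" := by
  simp only [pvBandsPre, pvLoopA]
  split_ifs
  · rw [pv_bl_eq pvThrPre co2 pv_sorted_pre 0 (by decide)
      (fun h => absurd h (by decide))
      (by intro h; simp only [pvThrPre]; simp; omega)]
    rfl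
  · rw [pv_bl_eq pvThrPre co2 pv_sorted_pre 1 (by decide)
      (by intro h; simp only [pvThrPre]; simp; omega)
      (by intro h; simp only [pvThrPre]; simp; omega)]
    rfl
  · rw [pv_bl_eq pvThrPre co2 pv_sorted_pre 2 (by decide)
      (by intro h; simp only [pvThrPre]; simp; omega)
      (by intro h; simp only [pvThrPre]; simp; omega)]
    rfl
  · rw [pv_bl_eq pvThrPre co2 pv_sorted_pre 3 (by decide)
      (by intro h; simp only [pvThrPre]; simp; omega)
      (by intro h; simp only [pvThrPre]; simp; omega)]
    rfl
  · rw [pv_bl_eq pvThrPre co2 pv_sorted_pre 4 (by decide)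
      (by intro h; simp only [pvThrPre]; simp; omega)
      (by intro h; simp only [pvThrPre]; simp; omega)]
    rfl
  · rw [pv_bl_eq pvThrPre co2 pv_sorted_pre 5 (by decide)
      (by intro h; simp only [pvThrPre]; simp; omega)
      (by intro h; simp only [pvThrPre]; simp; omega)]
    rfl
  · rw [pv_bl_eq pvThrPre co2 pv_sorted_pre 6 (by decide)
      (by intro h; simp only [pvThrPre]; simp; omega)
      (by intro h; simp only [pvThrPre]; simp; omega)]
    rfl
  · rw [pv_bl_eq pvThrPre co2 pv_sorted_pre 7 (by decide)
      (by intro h; simp only [pvThrPre]; simp; omega)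
      (by intro h; simp only [pvThrPre]; simp; omega)]
    rfl
  · rw [pv_bl_eq pvThrPre co2 pv_sorted_pre 8 (by decide)
      (by intro h; simp only [pvThrPre]; simp; omega)
      (fun h => absurd h (by decide))]
    rfl

-- ===== VERDICT (by name: the statement is the Claim_ definition above) =====
theorem get_co2_band_spec : Claim_equal_get_co2_band := by
  intro co2 year _
  unfold Spec_get_co2_band get_co2_band get_co2_band_alt
  match year with
  | none => exact pv_post co2
  | some y =>
    by_cases h : y ≥ 2017 <;> simp only [h, if_true, if_false]
    · exact pv_post co2
    · exact pv_pre co2
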